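-- pv_equiv track=rewrite | github.com/HAMA-team/HAMA-backend | src/constants/analysis_depth.py | get_recommended_workers
-- ===== SOURCE A (Python) =====
-- from typing import Dict, List, TypedDict
--
-- class AnalysisDepthConfig(TypedDict):
--     """분석 깊이 설정"""
--     name: str
--     description: str
--     required_workers: List[str]
--     optional_workers: List[str]
--     max_workers: int
--     estimated_time: str
--     use_cases: List[str]
--
-- ANALYSIS_DEPTH_LEVELS: Dict[str, AnalysisDepthConfig] = {
--     "brief": {  # quick → brief 변경
--         "name": "빠른 분석",
--         "description": "핵심 정보만 빠르게 확인",
--         "required_workers": ["data"],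
--         "optional_workers": ["technical"],
--         "max_workers": 3,
--         "estimated_time": "10-20초",
--         "use_cases": [
--             "현재가 확인",
--             "간단한 정보 조회",
--             "빠른 판단",
--             "가격 알림"
--         ]
--     },
--     "detailed": {  # standard → detailed 변경
--         "name": "표준 분석",
--         "description": "균형잡힌 분석 (기본값)",
--         "required_workers": ["data", "technical"],
--         "optional_workers": ["trading_flow", "bull", "bear", "macro"],  # information 제거
--         "max_workers": 5,
--         "estimated_time": "30-45초",
--         "use_cases": [
--             "일반적인 종목 분석",
--             "매매 판단",
--             "포트폴리오 검토",
--             "정기 모니터링"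
--         ]
--     },
--     "comprehensive": {
--         "name": "종합 분석",
--         "description": "모든 관점에서 심층 분석",
--         "required_workers": ["data", "technical", "trading_flow"],  # information 제거
--         "optional_workers": ["macro", "bull", "bear"],
--         "max_workers": 6,  # information 제거로 7 → 6
--         "estimated_time": "60-90초",
--         "use_cases": [
--             "신규 종목 발굴",
--             "장기 투자 결정",
--             "상세 리포트 생성",
--             "매수/매도 최종 판단"
--         ]
--     }
-- }
--
-- def get_depth_config(depth: str) -> AnalysisDepthConfig:
--     """
--     분석 깊이 설정 조회
--
--     Args:
--         depth: 분석 깊이 ("brief" | "detailed" | "comprehensive")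
--
--     Returns:
--         해당 깊이의 설정. 유효하지 않으면 "detailed" 반환
--     """
--     if depth not in ANALYSIS_DEPTH_LEVELS:
--         return ANALYSIS_DEPTH_LEVELS["detailed"]  # standard → detailed 변경
--     return ANALYSIS_DEPTH_LEVELS[depth]
--
-- def get_recommended_workers(
--     depth: str,
--     focus_areas: List[str] = None
-- ) -> List[str]:
--     """
--     분석 깊이와 집중 영역을 기반으로 추천 worker 리스트 생성
--
--     Args:
--         depth: 분석 깊이
--         focus_areas: 집중해야 할 worker 리스트
--
--     Returns:
--         추천 worker 리스트 (중복 제거됨)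
--     """
--     config = get_depth_config(depth)
--     workers = config["required_workers"].copy()
--
--     # Focus areas가 있으면 우선 추가
--     if focus_areas:
--         for worker in focus_areas:
--             if worker not in workers and len(workers) < config["max_workers"]:
--                 workers.append(worker)
--
--     # Optional workers 추가 (max_workers까지)
--     for worker in config["optional_workers"]:
--         if worker not in workers and len(workers) < config["max_workers"]:
--             workers.append(worker)
--
--     return workers
-- ===== SOURCE B (Python) =====
-- from typing import List
--
-- def get_recommended_workers(depth: str, focus_areas: List[str] = None) -> List[str]:
--     # plan selection as a plain branch chain (unknown depths fall back to "detailed"),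
--     # then one concatenate -> ordered-dedup -> truncate pipeline
--     if depth == "brief":
--         req, opt, cap = ["data"], ["technical"], 3
--     elif depth == "comprehensive":
--         req, opt, cap = ["data", "technical", "trading_flow"], ["macro", "bull", "bear"], 6
--     else:
--         req, opt, cap = ["data", "technical"], ["trading_flow", "bull", "bear", "macro"], 5
--     return list(dict.fromkeys(req + (focus_areas or []) + opt))[:cap]
-- ===== Notes on version B (the rewrite author's own statement) =====
-- stated objective: simpler
-- what changed: Replaces A's dict-backed config lookup plus two interleaved greedy append loops (per-item membership and length guards) by a plain branch chain selecting (required, optional, cap) and one concatenate -> order-preserving dedup (dict.fromkeys) -> slice-to-cap pipeline; correct because each config's required list is duplicate-free and no longer than its cap.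
import Mathlib
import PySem

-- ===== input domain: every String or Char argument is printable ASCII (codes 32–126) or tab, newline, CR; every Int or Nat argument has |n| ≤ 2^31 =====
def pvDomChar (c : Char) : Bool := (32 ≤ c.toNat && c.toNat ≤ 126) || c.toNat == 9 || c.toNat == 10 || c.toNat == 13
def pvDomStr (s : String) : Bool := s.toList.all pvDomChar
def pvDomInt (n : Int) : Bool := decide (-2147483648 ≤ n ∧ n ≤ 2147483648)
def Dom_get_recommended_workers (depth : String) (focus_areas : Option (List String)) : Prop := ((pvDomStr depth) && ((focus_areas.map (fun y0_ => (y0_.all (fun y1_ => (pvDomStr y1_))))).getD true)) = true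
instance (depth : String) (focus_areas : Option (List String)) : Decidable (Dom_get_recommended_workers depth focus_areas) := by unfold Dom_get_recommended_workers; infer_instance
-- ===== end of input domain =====

-- B replaces A's dict-backed config lookup and two interleaved greedy append loops by a plain
-- branch chain selecting (required, optional, cap) and one concatenate → ordered-dedup → truncate
-- pipeline; objective: simpler.
-- (Only the config fields this function reads are modelled; name/description/… are unused strings.)

-- ===== PORT A =====
structure PvConfig where
  required_workers : List String
  optional_workers : List String
  max_workers : Int
deriving Repr, DecidableEq

def pvLevels : PySem.Dict String PvConfig := PySem.Dict.ofList
  [ ("brief", ⟨["data"], ["technical"], 3⟩),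
    ("detailed", ⟨["data", "technical"], ["trading_flow", "bull", "bear", "macro"], 5⟩),
    ("comprehensive", ⟨["data", "technical", "trading_flow"], ["macro", "bull", "bear"], 6⟩) ]

def pvGetDepthConfig (depth : String) : PvConfig :=
  if ¬ pvLevels.contains depth then (pvLevels.get? "detailed").getD ⟨[], [], 0⟩
  else (pvLevels.get? depth).getD ⟨[], [], 0⟩

-- the body of A's two identical loops: append worker if not present and below max_workers
def pvStep (m : Int) (ws : List String) (w : String) : List String :=
  if w ∉ ws ∧ (ws.length : Int) < m then ws ++ [w] else ws

def get_recommended_workers (depth : String) (focus_areas : Option (List String)) : List String :=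
  let config := pvGetDepthConfig depth
  let workers := config.required_workers
  let workers :=
    match focus_areas with
    | none => workers
    | some fa => if fa.isEmpty then workers else fa.foldl (pvStep config.max_workers) workers
  config.optional_workers.foldl (pvStep config.max_workers) workers

-- ===== PORT B =====
def get_recommended_workers_alt (depth : String) (focus_areas : Option (List String)) : List String :=
  let plan : List String × List String × Int :=
    if depth == "brief" then (["data"], ["technical"], 3)
    else if depth == "comprehensive" then
      (["data", "technical", "trading_flow"], ["macro", "bull", "bear"], 6)
    else (["data", "technical"], ["trading_flow", "bull", "bear", "macro"], 5)
  PySem.List.slice (PySem.List.dedup (plan.1 ++ focus_areas.getD [] ++ plan.2.1)) none (some plan.2.2)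

-- ===== PRECONDITION & SPEC =====
def Spec_get_recommended_workers (depth : String) (focus_areas : Option (List String)) (out : List String) : Prop := out = get_recommended_workers_alt depth focus_areas
instance (depth : String) (focus_areas : Option (List String)) (out : List String) : Decidable (Spec_get_recommended_workers depth focus_areas out) := by unfold Spec_get_recommended_workers; infer_instance

-- ===== CLAIM (what is proved, stated in full; the proofs are below) =====
def Claim_equal_get_recommended_workers : Prop := ∀ (depth : String) (focus_areas : Option (List String)), Dom_get_recommended_workers depth focus_areas → Spec_get_recommended_workers depth focus_areas (get_recommended_workers depth focus_areas)

-- ===== LEMMAS AND PROOFS =====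

-- once the list is full, A's greedy loop changes nothing
theorem pv_foldl_full (m : Nat) (l ws : List String) (h : m ≤ ws.length) :
    l.foldl (pvStep (m : Int)) ws = ws := by
  induction l generalizing ws with
  | nil => rfl
  | cons w l ih =>
      have : pvStep (m : Int) ws w = ws := by
        unfold pvStep
        rw [if_neg]
        rintro ⟨-, hlt⟩
        omega
      simp [List.foldl_cons, this, ih ws h]

-- dedup-into-a-set only appends, so a prefix already at capacity survives truncation
theorem pv_take_update (m : Nat) (s : List String) (l : List String) (h : m ≤ s.length) :
    (PySem.Set.update s l).take m = s.take m := by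
  rw [PySem.Set.update_eq_append_filter]
  exact List.take_append_of_le_length h

-- core invariant: the greedy bounded-append loop equals "dedup into the accumulator, then truncate"
theorem pv_main (m : Nat) (l : List String) : ∀ (ws : List String), ws.length ≤ m →
    l.foldl (pvStep (m : Int)) ws = (PySem.Set.update ws l).take m := by
  induction l with
  | nil =>
      intro ws h
      simp [PySem.Set.update_nil, List.take_of_length_le h]
  | cons w l ih =>
      intro ws h
      rw [PySem.Set.update_cons, List.foldl_cons]
      by_cases hmem : w ∈ ws
      · have hadd : PySem.Set.add ws w = ws := by
          show (if ws.contains w then ws else ws ++ [w]) = ws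
          simp [hmem]
        have hstep : pvStep (m : Int) ws w = ws := by
          unfold pvStep; rw [if_neg]; rintro ⟨hn, -⟩; exact hn hmem
        rw [hadd, hstep]; exact ih ws h
      · have hadd : PySem.Set.add ws w = ws ++ [w] := by
          show (if ws.contains w then ws else ws ++ [w]) = ws ++ [w]
          simp [hmem]
        rw [hadd]
        by_cases hlt : ws.length < m
        · have hstep : pvStep (m : Int) ws w = ws ++ [w] := by
            unfold pvStep; rw [if_pos]; exact ⟨hmem, by exact_mod_cast hlt⟩
          rw [hstep]
          exact ih (ws ++ [w]) (by simp; omega)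
        · have hlen : ws.length = m := by omega
          have hstep : pvStep (m : Int) ws w = ws := by
            unfold pvStep; rw [if_neg]; rintro ⟨-, hl⟩
            exact hlt (by exact_mod_cast hl)
          rw [hstep, pv_foldl_full m l ws (by omega),
              pv_take_update m (ws ++ [w]) l (by simp; omega)]
          rw [List.take_append_of_le_length (by omega), ← hlen, List.take_length]

-- unknown depths fall back to the "detailed" config in A
theorem pv_config_default (depth : String)
    (h1 : depth ≠ "brief") (h2 : depth ≠ "detailed") (h3 : depth ≠ "comprehensive") :
    pvGetDepthConfig depth = ⟨["data", "technical"], ["trading_flow", "bull", "bear", "macro"], 5⟩ := by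
  unfold pvGetDepthConfig pvLevels
  have hc : (PySem.Dict.ofList
      [("brief", (⟨["data"], ["technical"], 3⟩ : PvConfig)),
       ("detailed", ⟨["data", "technical"], ["trading_flow", "bull", "bear", "macro"], 5⟩),
       ("comprehensive", ⟨["data", "technical", "trading_flow"], ["macro", "bull", "bear"], 6⟩)]).contains depth = false := by
    simp [PySem.Dict.ofList, PySem.Dict.contains]
    have hitems : (PySem.Dict.empty : PySem.Dict String PvConfig).update
        [("brief", (⟨["data"], ["technical"], 3⟩ : PvConfig)),
         ("detailed", ⟨["data", "technical"], ["trading_flow", "bull", "bear", "macro"], 5⟩),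
         ("comprehensive", ⟨["data", "technical", "trading_flow"], ["macro", "bull", "bear"], 6⟩)] =
        { items := [("brief", (⟨["data"], ["technical"], 3⟩ : PvConfig)),
         ("detailed", ⟨["data", "technical"], ["trading_flow", "bull", "bear", "macro"], 5⟩),
         ("comprehensive", ⟨["data", "technical", "trading_flow"], ["macro", "bull", "bear"], 6⟩)] } := by decide
    rw [hitems]
    rintro a b hab
    simp at hab
    rcases hab with ⟨ha,-⟩|⟨ha,-⟩|⟨ha,-⟩ <;> simp [ha, Ne.symm, h1, h2, h3]
  rw [if_pos (by simp [hc])]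
  decide

-- both ports, for ONE fixed config, after peeling focus_areas to a plain list
theorem pv_one_config (req opt fo : List String) (m : Nat)
    (hreq : PySem.Set.ofList req = req) (hlen : req.length ≤ m) :
    (fo ++ opt).foldl (pvStep (m : Int)) req =
      PySem.List.slice (PySem.List.dedup (req ++ fo ++ opt)) none (some (m : Int)) := by
  rw [PySem.List.slice_to_natCast, PySem.List.dedup_eq_ofList, List.append_assoc,
      PySem.Set.ofList_append, hreq]
  exact pv_main m (fo ++ opt) req hlen

-- A's two loops and focus-areas truthiness test collapse to one fold over fo ++ opt
theorem pv_A_eq_fold (depth : String) (focus_areas : Option (List String)) :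
    get_recommended_workers depth focus_areas =
      ((focus_areas.getD []) ++ (pvGetDepthConfig depth).optional_workers).foldl
        (pvStep (pvGetDepthConfig depth).max_workers) (pvGetDepthConfig depth).required_workers := by
  unfold get_recommended_workers
  rw [List.foldl_append]
  match focus_areas with
  | none => rfl
  | some fa =>
      by_cases hfa : fa.isEmpty
      · simp only [Option.getD_some]
        rw [List.isEmpty_iff.mp hfa]
        rfl
      · simp [hfa]

-- ===== VERDICT (by name: the statement is the Claim_ definition above) =====
theorem get_recommended_workers_spec : Claim_equal_get_recommended_workers := by
  intro depth focus_areas _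
  unfold Spec_get_recommended_workers get_recommended_workers_alt
  rw [pv_A_eq_fold]
  by_cases h1 : depth = "brief"
  · subst h1
    have hA : pvGetDepthConfig "brief" = ⟨["data"], ["technical"], 3⟩ := by decide
    simp only [hA, beq_self_eq_true, if_true]
    exact pv_one_config _ _ _ 3 (by decide) (by decide)
  · by_cases h3 : depth = "comprehensive"
    · subst h3
      have hA : pvGetDepthConfig "comprehensive" =
          ⟨["data", "technical", "trading_flow"], ["macro", "bull", "bear"], 6⟩ := by decide
      simp only [hA, show (("comprehensive" == "brief") = false) by decide,
        beq_self_eq_true, if_true]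
      exact pv_one_config _ _ _ 6 (by decide) (by decide)
    · have hA : pvGetDepthConfig depth =
          ⟨["data", "technical"], ["trading_flow", "bull", "bear", "macro"], 5⟩ := by
        by_cases h2 : depth = "detailed"
        · subst h2; decide
        · exact pv_config_default depth h1 h2 h3
      simp only [hA, beq_iff_eq, h1, h3, if_false]
      exact pv_one_config _ _ _ 5 (by decide) (by decide)
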